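-- pv_equiv track=rewrite | github.com/abiugu/projects | primeiros projetos/contagem de aparições.py | encontrar_maior_tempo_sem_aparicao
-- ===== SOURCE A (Python) =====
-- def encontrar_maior_tempo_sem_aparicao(lista_numeros):
--     maior_tempo_sem_aparicao = {}
--     ultima_aparicao = {}
--
--     for numero in range(15):  # Números de 0 a 14
--         maior_tempo_sem_aparicao[numero] = 0
--         ultima_aparicao[numero] = -1
--
--     for i, numero in enumerate(lista_numeros):
--         if ultima_aparicao[numero] != -1:
--             tempo_sem_aparicao = i - ultima_aparicao[numero] - 1
--             if tempo_sem_aparicao > maior_tempo_sem_aparicao[numero]: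
--                 maior_tempo_sem_aparicao[numero] = tempo_sem_aparicao
--         ultima_aparicao[numero] = i
--
--     return maior_tempo_sem_aparicao
-- ===== SOURCE B (Python) =====
-- def encontrar_maior_tempo_sem_aparicao(lista_numeros):
--     # two-phase decomposition: collect occurrence positions per number, then
--     # compute each number's max gap from consecutive positions
--     positions = {n: [] for n in range(15)}
--     for i, numero in enumerate(lista_numeros):
--         positions[numero].append(i)
--     resultado = {}
--     for n in range(15):
--         ps = positions[n]
--         maior = 0
--         for prev, cur in zip(ps, ps[1:]):
--             gap = cur - prev - 1
--             if gap > maior: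
--                 maior = gap
--         resultado[n] = maior
--     return resultado
-- ===== Notes on version B (the rewrite author's own statement) =====
-- stated objective: alternative
-- what changed: Replaces A's single interleaved scan maintaining two running dicts (max gap + last index per number) with a two-phase decomposition: one pass grouping occurrence indices per number, then a per-number pass over consecutive position pairs computing the max gap.
import Mathlib
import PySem

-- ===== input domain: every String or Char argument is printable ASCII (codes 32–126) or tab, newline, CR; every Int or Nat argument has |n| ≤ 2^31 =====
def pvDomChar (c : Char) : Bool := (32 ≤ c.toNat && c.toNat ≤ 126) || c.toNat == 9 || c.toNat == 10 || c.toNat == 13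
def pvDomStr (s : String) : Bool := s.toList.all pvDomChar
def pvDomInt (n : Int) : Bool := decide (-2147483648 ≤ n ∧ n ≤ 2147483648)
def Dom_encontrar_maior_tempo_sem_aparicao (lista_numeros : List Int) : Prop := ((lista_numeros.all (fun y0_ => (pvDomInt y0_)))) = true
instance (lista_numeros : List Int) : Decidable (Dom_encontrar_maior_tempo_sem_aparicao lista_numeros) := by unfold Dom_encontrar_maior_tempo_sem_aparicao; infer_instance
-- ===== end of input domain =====

-- B replaces A's single interleaved scan (running max-gap + last-index dicts) with a
-- two-phase decomposition: group occurrence indices per number, then take each number's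
-- max gap over consecutive position pairs (alternative decomposition, same cost).


-- ===== PORT A =====
def encontrar_maior_tempo_sem_aparicao (lista_numeros : List Int) : List (Int × Int) :=
  -- seed both dicts in one loop over range(15), as A does
  let init : PySem.Dict Int Int × PySem.Dict Int Int :=
    (PySem.List.pyRange 0 15 1).foldl
      (fun st numero => (st.1.insert numero 0, st.2.insert numero (-1)))
      (PySem.Dict.empty, PySem.Dict.empty)
  -- `ultima_aparicao[numero]` / `maior_tempo_sem_aparicao[numero]` raise KeyError for
  -- numero outside 0..14; Pre_ excludes those inputs, so getD's default is never used there
  let final : PySem.Dict Int Int × PySem.Dict Int Int :=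
    (PySem.List.enumerate lista_numeros 0).foldl
      (fun st p =>
        let last := st.2.getD p.2 (-1)
        if last ≠ -1 then
          let tempo := p.1 - last - 1
          let m := if tempo > st.1.getD p.2 0 then st.1.insert p.2 tempo else st.1
          (m, st.2.insert p.2 p.1)
        else
          (st.1, st.2.insert p.2 p.1))
      init
  final.1.items

-- ===== PORT B =====
-- max gap over consecutive pairs: `for prev, cur in zip(ps, ps[1:])`
def pvGap (ps : List Int) : Int :=
  (ps.zip (ps.drop 1)).foldl
    (fun maior q => let gap := q.2 - q.1 - 1; if gap > maior then gap else maior) 0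

def encontrar_maior_tempo_sem_aparicao_alt (lista_numeros : List Int) : List (Int × Int) :=
  let positions0 : PySem.Dict Int (List Int) :=
    (PySem.List.pyRange 0 15 1).foldl (fun d n => d.insert n []) PySem.Dict.empty
  -- `positions[numero].append(i)` raises KeyError for numero outside 0..14; Pre_
  -- excludes those inputs, so modify's default is never used there
  let positions : PySem.Dict Int (List Int) :=
    (PySem.List.enumerate lista_numeros 0).foldl
      (fun d p => d.modify p.2 [] (fun l => l ++ [p.1])) positions0
  let resultado : PySem.Dict Int Int :=
    (PySem.List.pyRange 0 15 1).foldl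
      (fun r n => r.insert n (pvGap (positions.getD n []))) PySem.Dict.empty
  resultado.items

-- ===== PRECONDITION & SPEC =====
-- Pre_ excludes exactly the inputs on which A raises KeyError: a value outside 0..14.
def Pre_encontrar_maior_tempo_sem_aparicao (lista_numeros : List Int) : Prop :=
  ∀ x ∈ lista_numeros, 0 ≤ x ∧ x < 15
instance (lista_numeros : List Int) : Decidable (Pre_encontrar_maior_tempo_sem_aparicao lista_numeros) := by
  unfold Pre_encontrar_maior_tempo_sem_aparicao; infer_instance
def pvWitness_encontrar_maior_tempo_sem_aparicao : List Int := [1, 2, 1, 3, 14, 0, 1]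

def Spec_encontrar_maior_tempo_sem_aparicao (lista_numeros : List Int) (out : List (Int × Int)) : Prop := out = encontrar_maior_tempo_sem_aparicao_alt lista_numeros
instance (lista_numeros : List Int) (out : List (Int × Int)) : Decidable (Spec_encontrar_maior_tempo_sem_aparicao lista_numeros out) := by unfold Spec_encontrar_maior_tempo_sem_aparicao; infer_instance

-- ===== CLAIM (what is proved, stated in full; the proofs are below) =====
def Claim_equal_encontrar_maior_tempo_sem_aparicao : Prop := ∀ (lista_numeros : List Int), Dom_encontrar_maior_tempo_sem_aparicao lista_numeros → Pre_encontrar_maior_tempo_sem_aparicao lista_numeros → Spec_encontrar_maior_tempo_sem_aparicao lista_numeros (encontrar_maior_tempo_sem_aparicao lista_numeros)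

-- ===== LEMMAS AND PROOFS =====

-- occurrence positions of n in l (the list B's `positions[n]` holds, A's per-key trace)
def pvOcc (n : Int) (l : List Int) : List Int :=
  ((PySem.List.enumerate l 0).filter (fun p => p.2 == n)).map (·.1)

-- reference per-key fold: A's update step replayed over one occurrence list
def pvStepR (st : Int × Int) (i : Int) : Int × Int :=
  if st.2 ≠ -1 then
    (if i - st.2 - 1 > st.1 then i - st.2 - 1 else st.1, i)
  else (st.1, i)

def pvRef (ps : List Int) : Int × Int := ps.foldl pvStepR (0, -1)

-- A's step and state, named so the invariant can speak about them (definitional copies of A's port)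
def pvStepA (st : PySem.Dict Int Int × PySem.Dict Int Int) (p : Int × Int) :
    PySem.Dict Int Int × PySem.Dict Int Int :=
  let last := st.2.getD p.2 (-1)
  if last ≠ -1 then
    let tempo := p.1 - last - 1
    let m := if tempo > st.1.getD p.2 0 then st.1.insert p.2 tempo else st.1
    (m, st.2.insert p.2 p.1)
  else
    (st.1, st.2.insert p.2 p.1)

def pvInitA : PySem.Dict Int Int × PySem.Dict Int Int :=
  (PySem.List.pyRange 0 15 1).foldl
    (fun st numero => (st.1.insert numero 0, st.2.insert numero (-1)))
    (PySem.Dict.empty, PySem.Dict.empty)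

def pvStateA (l : List Int) : PySem.Dict Int Int × PySem.Dict Int Int :=
  (PySem.List.enumerate l 0).foldl pvStepA pvInitA

lemma pvA_eq (l : List Int) :
    encontrar_maior_tempo_sem_aparicao l = (pvStateA l).1.items := rfl

lemma pvInitA_eq :
    pvInitA = ((PySem.List.pyRange 0 15 1).foldl (fun d n => d.insert n 0) PySem.Dict.empty,
               (PySem.List.pyRange 0 15 1).foldl (fun d n => d.insert n (-1)) PySem.Dict.empty) := by
  simpa [pvInitA] using
    PySem.List.foldl_prod_mk (fun d (n : Int) => d.insert n (0 : Int))
      (fun d (n : Int) => d.insert n (-1 : Int)) (PySem.List.pyRange 0 15 1)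
      PySem.Dict.empty PySem.Dict.empty

lemma pvInitA_fst : pvInitA.1
    = (PySem.List.pyRange 0 15 1).foldl (fun d n => d.insert n 0) PySem.Dict.empty := by
  simpa using congrArg Prod.fst pvInitA_eq

lemma pvInitA_snd : pvInitA.2
    = (PySem.List.pyRange 0 15 1).foldl (fun d n => d.insert n (-1)) PySem.Dict.empty := by
  simpa using congrArg Prod.snd pvInitA_eq

-- inserting the same constant everywhere leaves getD at that constant
lemma pvGetD_foldl_insert_const {ν : Type} (ls : List Int) (d : PySem.Dict Int ν) (c : Int) (v : ν)
    (h : d.getD c v = v) : (ls.foldl (fun d n => d.insert n v) d).getD c v = v := by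
  induction ls generalizing d with
  | nil => exact h
  | cons a t ih =>
    simp only [List.foldl_cons]
    exact ih _ (by rw [PySem.Dict.getD_insert]; split <;> simp [h])

lemma pvKeys_seed {ν : Type} (v : ν) :
    ((PySem.List.pyRange 0 15 1).foldl (fun d n => d.insert n v) PySem.Dict.empty).keys
      = PySem.List.pyRange 0 15 1 := by
  have h := PySem.Dict.items_foldl_insert_fresh (PySem.List.pyRange 0 15 1) (fun a => a)
    (fun _ => v) PySem.Dict.empty (by intro a _; simp [PySem.Dict.contains_empty])
    (by simpa using PySem.List.nodup_pyRange_one 0 15)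
  simp only [PySem.Dict.keys] at *
  simp only [h]
  simp [PySem.Dict.empty, Function.comp_def]

-- B's grouping pass: getD after the modify-append loop
lemma pvGetD_posfold (e : List (Int × Int)) (d : PySem.Dict Int (List Int)) (c : Int) :
    (e.foldl (fun d p => d.modify p.2 [] (fun l => l ++ [p.1])) d).getD c []
      = d.getD c [] ++ (e.filter (fun p => p.2 == c)).map (·.1) := by
  induction e generalizing d with
  | nil => simp
  | cons a t ih =>
    simp only [List.foldl_cons, ih, List.filter_cons]
    rw [PySem.Dict.getD_modify]
    by_cases hc : c = a.2
    · simp [hc]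
    · have hbc : (a.2 == c) = false := by simp [Ne.symm hc]
      simp [hc, hbc]

-- B's output as a map over 0..14
lemma pvAlt_eq (l : List Int) :
    encontrar_maior_tempo_sem_aparicao_alt l
      = (PySem.List.pyRange 0 15 1).map (fun n => (n, pvGap (pvOcc n l))) := by
  simp only [encontrar_maior_tempo_sem_aparicao_alt]
  have h := PySem.Dict.items_foldl_insert_fresh (PySem.List.pyRange 0 15 1) (fun a => a)
    (fun n => pvGap (((PySem.List.enumerate l 0).foldl
        (fun d p => d.modify p.2 [] (fun l => l ++ [p.1]))
        ((PySem.List.pyRange 0 15 1).foldl (fun d n => d.insert n ([] : List Int))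
          PySem.Dict.empty)).getD n []))
    PySem.Dict.empty (by intro a _; simp [PySem.Dict.contains_empty])
    (by simpa using PySem.List.nodup_pyRange_one 0 15)
  have hpos : ∀ n : Int,
      ((PySem.List.enumerate l 0).foldl (fun d p => d.modify p.2 [] (fun l => l ++ [p.1]))
        ((PySem.List.pyRange 0 15 1).foldl (fun d n => d.insert n ([] : List Int))
          PySem.Dict.empty)).getD n [] = pvOcc n l := by
    intro n
    rw [pvGetD_posfold]
    rw [pvGetD_foldl_insert_const _ _ n [] (by simp)]
    simp [pvOcc]
  simp only [] at h
  rw [h]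
  simp only [hpos]
  simp [PySem.Dict.empty]

-- snoc form of the consecutive-pairs zip
lemma pvZip_drop_snoc (a : Int) (ps : List Int) (i : Int) :
    ((a :: ps) ++ [i]).zip (ps ++ [i]) = (a :: ps).zip ps ++ [((a :: ps).getLastD (-1), i)] := by
  induction ps generalizing a with
  | nil => simp
  | cons b t ih =>
    have hb := ih b
    simp only [List.cons_append, List.zip_cons_cons] at hb ⊢
    rw [hb]
    simp

-- B's per-key loop equals the reference fold on nonneg position lists
lemma pvGap_ref (ps : List Int) (h : ∀ x ∈ ps, 0 ≤ x) :
    pvGap ps = (pvRef ps).1 ∧ (pvRef ps).2 = ps.getLastD (-1) := by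
  induction ps using List.reverseRecOn with
  | nil => simp [pvGap, pvRef]
  | append_singleton t i iht =>
    have ht : ∀ x ∈ t, 0 ≤ x := fun x hx => h x (by simp [hx])
    have href : pvRef (t ++ [i]) = pvStepR (pvRef t) i := by
      simp [pvRef, List.foldl_append]
    cases t with
    | nil => simp [pvGap, pvRef, pvStepR]
    | cons a t' =>
      obtain ⟨ih1, ih2⟩ := iht ht
      have hlastmem : (a :: t').getLastD (-1) ∈ a :: t' := by
        rw [List.getLastD_cons]
        exact List.getLastD_mem_cons
      have hlast0 : (0:Int) ≤ (a :: t').getLastD (-1) := ht _ hlastmem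
      have hcond' : (a :: t').getLastD (-1 : Int) ≠ -1 := by omega
      have hgap : pvGap ((a :: t') ++ [i]) =
          (if i - (a :: t').getLastD (-1) - 1 > pvGap (a :: t') then i - (a :: t').getLastD (-1) - 1
           else pvGap (a :: t')) := by
        simp only [pvGap]
        rw [show ((a :: t') ++ [i]).drop 1 = t' ++ [i] by simp,
            pvZip_drop_snoc, List.foldl_append]
        simp [show (a :: t').drop 1 = t' by simp]
      have hlastE : ((a :: t') ++ [i]).getLastD (-1) = i := by
        rw [List.getLastD_eq_getLast?, List.getLast?_concat]; rfl
      constructor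
      · rw [hgap, href]
        simp only [pvStepR, ih1, ih2]
        rw [if_pos hcond']
      · rw [href]
        simp only [pvStepR, ih2]
        rw [if_pos hcond']
        simpa using hlastE.symm

-- enumerate facts specialised to this file
lemma pvOcc_append (n : Int) (l : List Int) (x : Int) :
    pvOcc n (l ++ [x]) = pvOcc n l ++ (if x == n then [(l.length : Int)] else []) := by
  by_cases hx : (x == n) = true <;>
    simp [pvOcc, PySem.List.enumerate_append, PySem.List.enumerate_cons, hx]

lemma pvOcc_nonneg (n : Int) (l : List Int) : ∀ x ∈ pvOcc n l, 0 ≤ x := by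
  intro x hx
  simp only [pvOcc, List.mem_map, List.mem_filter] at hx
  obtain ⟨p, ⟨hp, _⟩, rfl⟩ := hx
  rw [PySem.List.mem_enumerate_iff] at hp
  obtain ⟨k, hk, rfl⟩ := hp
  simp

lemma pvStateA_snoc (l : List Int) (x : Int) :
    pvStateA (l ++ [x]) = pvStepA (pvStateA l) ((l.length : Int), x) := by
  simp [pvStateA, PySem.List.enumerate_append, PySem.List.enumerate_cons, List.foldl_append]

-- the loop invariant of A's main scan
lemma pvStateA_inv (l : List Int) (h : ∀ x ∈ l, 0 ≤ x ∧ x < 15) :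
    (pvStateA l).1.keys = PySem.List.pyRange 0 15 1 ∧
    (pvStateA l).2.keys = PySem.List.pyRange 0 15 1 ∧
    ∀ n : Int, (pvStateA l).1.getD n 0 = (pvRef (pvOcc n l)).1 ∧
      (pvStateA l).2.getD n (-1) = (pvRef (pvOcc n l)).2 := by
  induction l using List.reverseRecOn with
  | nil =>
    have h0 : pvStateA [] = pvInitA := by simp [pvStateA]
    rw [h0, pvInitA_fst, pvInitA_snd]
    refine ⟨pvKeys_seed 0, pvKeys_seed (-1), ?_⟩
    intro n
    constructor
    · simpa [pvOcc, pvRef] using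
        pvGetD_foldl_insert_const (PySem.List.pyRange 0 15 1) PySem.Dict.empty n 0 (by simp)
    · simpa [pvOcc, pvRef] using
        pvGetD_foldl_insert_const (PySem.List.pyRange 0 15 1) PySem.Dict.empty n (-1) (by simp)
  | append_singleton t x iht =>
    have hx : 0 ≤ x ∧ x < 15 := h x (by simp)
    have ht : ∀ y ∈ t, 0 ≤ y ∧ y < 15 := fun y hy => h y (by simp [hy])
    obtain ⟨k1, k2, hv⟩ := iht ht
    have hc1 : (pvStateA t).1.contains x = true := by
      rw [PySem.Dict.contains_iff_mem_keys, k1, PySem.List.mem_pyRange_one]; exact hx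
    have hc2 : (pvStateA t).2.contains x = true := by
      rw [PySem.Dict.contains_iff_mem_keys, k2, PySem.List.mem_pyRange_one]; exact hx
    have hrefsnoc : ∀ n : Int, pvRef (pvOcc n t ++ [(t.length : Int)]) =
        pvStepR (pvRef (pvOcc n t)) (t.length : Int) := by
      intro n; simp [pvRef, List.foldl_append]
    rw [pvStateA_snoc]
    simp only [pvStepA]
    by_cases hlast : (pvStateA t).2.getD x (-1) = -1
    · rw [if_neg (by simp [hlast])]
      refine ⟨k1, by rw [PySem.Dict.keys_insert_of_contains _ _ hc2]; exact k2, ?_⟩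
      intro n
      by_cases hn : n = x
      · subst hn
        have hocc : pvOcc n (t ++ [n]) = pvOcc n t ++ [(t.length : Int)] := by
          simp [pvOcc_append]
        rw [hocc, hrefsnoc n]
        constructor
        · rw [(hv n).1, pvStepR, if_neg (by rw [← (hv n).2]; simp [hlast])]
        · rw [PySem.Dict.getD_insert_self, pvStepR, if_neg (by rw [← (hv n).2]; simp [hlast])]
      · have hxn : (x == n) = false := beq_eq_false_iff_ne.mpr (fun e => hn e.symm)
        have hocc : pvOcc n (t ++ [x]) = pvOcc n t := by simp [pvOcc_append, hxn]
        rw [hocc]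
        exact ⟨(hv n).1, by rw [PySem.Dict.getD_insert_of_ne _ _ _ hn]; exact (hv n).2⟩
    · rw [if_pos hlast]
      refine ⟨?_, ?_, ?_⟩
      · split
        · rw [PySem.Dict.keys_insert_of_contains _ _ hc1]; exact k1
        · exact k1
      · rw [PySem.Dict.keys_insert_of_contains _ _ hc2]; exact k2
      · intro n
        by_cases hn : n = x
        · subst hn
          have hocc : pvOcc n (t ++ [n]) = pvOcc n t ++ [(t.length : Int)] := by
            simp [pvOcc_append]
          rw [hocc, hrefsnoc n]
          have hcond : (pvRef (pvOcc n t)).2 ≠ -1 := by rw [← (hv n).2]; exact hlast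
          rw [pvStepR, if_pos hcond]
          refine ⟨?_, by rw [PySem.Dict.getD_insert_self]⟩
          rw [← (hv n).1, ← (hv n).2]
          split_ifs with hc
          · rw [PySem.Dict.getD_insert_self]
          · rfl
        · have hxn : (x == n) = false := beq_eq_false_iff_ne.mpr (fun e => hn e.symm)
          have hocc : pvOcc n (t ++ [x]) = pvOcc n t := by simp [pvOcc_append, hxn]
          rw [hocc]
          constructor
          · split
            · rw [PySem.Dict.getD_insert_of_ne _ _ _ hn]; exact (hv n).1
            · exact (hv n).1
          · rw [PySem.Dict.getD_insert_of_ne _ _ _ hn]; exact (hv n).2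

-- ===== VERDICT (by name: the statement is the Claim_ definition above) =====
theorem encontrar_maior_tempo_sem_aparicao_spec : Claim_equal_encontrar_maior_tempo_sem_aparicao := by
  intro l _ hpre
  unfold Spec_encontrar_maior_tempo_sem_aparicao
  have hpre' : ∀ x ∈ l, 0 ≤ x ∧ x < 15 := hpre
  obtain ⟨k1, _, hv⟩ := pvStateA_inv l hpre'
  rw [pvA_eq,
    PySem.Dict.items_eq_map_keys _ (by rw [k1]; exact PySem.List.nodup_pyRange_one 0 15) 0,
    k1, pvAlt_eq]
  apply List.map_congr_left
  intro n _
  rw [(hv n).1, (pvGap_ref (pvOcc n l) (pvOcc_nonneg n l)).1]
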